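-- pv_equiv track=rewrite | github.com/raphael-attias/runtrack-python | Jours04/Job14/Job14.py | my_long_word
-- ===== SOURCE A (Python) =====
-- def my_long_word(taille_minimale, phrase):
--     mots_plus_longs = ""
--     mot_actuel = ""
--     espace = ' '
--
--     for caractere in phrase:
--         # Si le caractère n'est pas un espace, ajoute-le au mot actuel
--         if caractere != espace:
--             mot_actuel += caractere
--         else:
--             # Si le mot actuel a une longueur supérieure à la taille minimale, ajoute-le à la chaîne résultante
--             if mot_actuel and len(mot_actuel) > taille_minimale:
--                 if mots_plus_longs:
--                     mots_plus_longs += ' '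
--                 mots_plus_longs += mot_actuel
--
--             mot_actuel = ""
--
--     # Vérifie le dernier mot après la boucle
--     if mot_actuel and len(mot_actuel) > taille_minimale:
--         if mots_plus_longs:
--             mots_plus_longs += ' '
--         mots_plus_longs += mot_actuel
--
--     return mots_plus_longs
-- ===== SOURCE B (Python) =====
-- def my_long_word(taille_minimale, phrase):
--     return ' '.join(w for w in phrase.split(' ')
--                     if w and len(w) > taille_minimale)
-- ===== Notes on version B (the rewrite author's own statement) =====
-- stated objective: simpler
-- what changed: Replaces the manual char-by-char tokenizer and conditional space-gluing with phrase.split(' ') followed by a filter and a single ' '.join.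
import Mathlib
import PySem

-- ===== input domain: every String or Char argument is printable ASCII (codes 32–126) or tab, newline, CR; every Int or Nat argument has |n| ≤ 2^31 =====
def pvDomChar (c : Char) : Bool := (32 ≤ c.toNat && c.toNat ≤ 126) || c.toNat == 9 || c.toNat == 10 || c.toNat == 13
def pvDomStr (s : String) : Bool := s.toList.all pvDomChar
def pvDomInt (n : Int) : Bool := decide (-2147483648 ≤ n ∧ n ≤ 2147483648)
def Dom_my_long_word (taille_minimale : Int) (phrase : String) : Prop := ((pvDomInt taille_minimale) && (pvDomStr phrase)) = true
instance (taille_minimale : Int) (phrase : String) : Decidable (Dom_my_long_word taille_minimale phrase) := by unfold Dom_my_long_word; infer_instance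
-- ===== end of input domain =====

-- B replaces A's char-by-char tokenizer with split(' ') + filter + ' '.join (objective: simpler).

-- ===== PORT A =====
-- one loop step: strings kept as List Char (Python's += is list append here)
def myLongWordStep (taille_minimale : Int) (st : List Char × List Char) (c : Char) :
    List Char × List Char :=
  if c ≠ ' ' then (st.1, st.2 ++ [c])
  else if st.2 ≠ [] ∧ taille_minimale < (st.2.length : Int) then
    ((if st.1 ≠ [] then st.1 ++ [' '] else st.1) ++ st.2, [])
  else (st.1, [])

-- the "check the last word" block after the loop
def myLongWordFinish (taille_minimale : Int) (st : List Char × List Char) : List Char :=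
  if st.2 ≠ [] ∧ taille_minimale < (st.2.length : Int) then
    (if st.1 ≠ [] then st.1 ++ [' '] else st.1) ++ st.2
  else st.1

def my_long_word (taille_minimale : Int) (phrase : String) : String :=
  String.ofList (myLongWordFinish taille_minimale
    (phrase.toList.foldl (myLongWordStep taille_minimale) ([], [])))

-- ===== PORT B =====
def my_long_word_alt (taille_minimale : Int) (phrase : String) : String :=
  String.ofList (PySem.Chars.join [' ']
    ((PySem.Chars.splitOn phrase.toList [' ']).filter
      (fun w => decide (w ≠ [] ∧ taille_minimale < (w.length : Int)))))

-- ===== PRECONDITION & SPEC =====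
def Spec_my_long_word (taille_minimale : Int) (phrase : String) (out : String) : Prop := out = my_long_word_alt taille_minimale phrase
instance (taille_minimale : Int) (phrase : String) (out : String) : Decidable (Spec_my_long_word taille_minimale phrase out) := by unfold Spec_my_long_word; infer_instance

-- ===== CLAIM (what is proved, stated in full; the proofs are below) =====
def Claim_equal_my_long_word : Prop := ∀ (taille_minimale : Int) (phrase : String), Dom_my_long_word taille_minimale phrase → Spec_my_long_word taille_minimale phrase (my_long_word taille_minimale phrase)

-- ===== LEMMAS AND PROOFS =====

-- a direct recursion computing Python's s.split(' ')
def mySplit (cur : List Char) : List Char → List (List Char)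
  | [] => [cur]
  | c :: rest => if c = ' ' then cur :: mySplit [] rest else mySplit (cur ++ [c]) rest

-- "append with a separating space when both sides are nonempty"
def app2 (a b : List Char) : List Char :=
  if a = [] then b else if b = [] then a else a ++ ' ' :: b

theorem go_eq_mySplit (l : List Char) : ∀ (fuel : Nat) (cur : List Char) (acc : List (List Char)),
    l.length ≤ fuel →
    PySem.Chars.splitOn.go [' '] fuel l cur acc = acc.reverse ++ mySplit cur.reverse l := by
  induction l with
  | nil =>
    intro fuel cur acc _
    cases fuel <;> simp [PySem.Chars.splitOn.go, mySplit]
  | cons c rest ih =>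
    intro fuel cur acc h
    cases fuel with
    | zero => simp at h
    | succ fuel =>
      simp only [PySem.Chars.splitOn.go]
      by_cases hc : c = ' '
      · subst hc
        rw [if_pos (by simp [List.isPrefixOf])]
        simp only [List.length_cons, List.length_nil, List.drop_succ_cons, List.drop_zero]
        rw [ih fuel [] (cur.reverse :: acc) (by simpa using h)]
        simp [mySplit]
      · rw [if_neg (by simp [List.isPrefixOf]; intro h'; exact hc h'.symm)]
        rw [ih fuel (c :: cur) acc (by simpa using h)]
        simp [mySplit, hc]

theorem splitOn_eq_mySplit (l : List Char) :
    PySem.Chars.splitOn l [' '] = mySplit [] l := by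
  rw [PySem.Chars.splitOn, go_eq_mySplit l (l.length + 1) [] [] (by omega)]
  simp

theorem join_ne_nil (fs : List (List Char)) (hne : fs ≠ [])
    (hall : ∀ w ∈ fs, w ≠ []) : PySem.Chars.join [' '] fs ≠ [] := by
  cases fs with
  | nil => exact absurd rfl hne
  | cons w ws =>
    have hw : w ≠ [] := hall w (by simp)
    cases ws with
    | nil => simpa [PySem.Chars.join, List.intercalate] using hw
    | cons g gs =>
      simp [PySem.Chars.join, List.intercalate, List.intersperse]

theorem app2_join_cons (acc cur : List Char) (fs : List (List Char))
    (hcur : cur ≠ []) (hall : ∀ w ∈ fs, w ≠ []) :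
    app2 (app2 acc cur) (PySem.Chars.join [' '] fs)
      = app2 acc (PySem.Chars.join [' '] (cur :: fs)) := by
  cases fs with
  | nil => simp [app2, PySem.Chars.join, List.intercalate, hcur]
  | cons g gs =>
    have hj : PySem.Chars.join [' '] (g :: gs) ≠ [] := join_ne_nil _ (by simp) hall
    have hjoin : PySem.Chars.join [' '] (cur :: g :: gs)
        = cur ++ ' ' :: PySem.Chars.join [' '] (g :: gs) := by
      simp [PySem.Chars.join, List.intercalate, List.intersperse]
    rw [hjoin]
    by_cases hacc : acc = []
    · subst hacc; simp [app2, hcur, hj]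
    · simp [app2, hacc, hcur, hj]

theorem filter_mySplit_ne_nil (t : Int) (cur l : List Char) :
    ∀ w ∈ (mySplit cur l).filter (fun w => decide (w ≠ [] ∧ t < (w.length : Int))), w ≠ [] := by
  intro w hw
  have := List.of_mem_filter hw
  simp at this
  exact this.1

theorem loop_eq (t : Int) (l : List Char) : ∀ (acc cur : List Char),
    myLongWordFinish t (l.foldl (myLongWordStep t) (acc, cur))
    = app2 acc (PySem.Chars.join [' ']
        ((mySplit cur l).filter (fun w => decide (w ≠ [] ∧ t < (w.length : Int))))) := by
  induction l with
  | nil =>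
    intro acc cur
    simp only [List.foldl_nil, mySplit, List.filter, myLongWordFinish]
    by_cases hP : cur ≠ [] ∧ t < (cur.length : Int)
    · rw [if_pos hP]
      simp only [decide_eq_true hP]
      by_cases hacc : acc = []
      · subst hacc; simp [app2, PySem.Chars.join, List.intercalate]
      · simp [app2, hacc, PySem.Chars.join, List.intercalate, hP.1]
    · rw [if_neg hP]
      simp only [decide_eq_false hP]
      by_cases hacc : acc = [] <;> simp [app2, hacc, PySem.Chars.join, List.intercalate]
  | cons c rest ih =>
    intro acc cur
    simp only [List.foldl_cons]
    by_cases hc : c = ' '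
    · subst hc
      rw [show mySplit cur (' ' :: rest) = cur :: mySplit [] rest from by simp [mySplit]]
      by_cases hP : cur ≠ [] ∧ t < (cur.length : Int)
      · rw [show myLongWordStep t (acc, cur) ' '
            = ((if acc ≠ [] then acc ++ [' '] else acc) ++ cur, []) from by
          unfold myLongWordStep
          rw [if_neg (by simp), if_pos hP]]
        rw [ih ((if acc ≠ [] then acc ++ [' '] else acc) ++ cur) []]
        have happ : (if acc ≠ [] then acc ++ [' '] else acc) ++ cur = app2 acc cur := by
          by_cases hacc : acc = [] <;> simp [app2, hacc, hP.1]
        rw [happ, List.filter_cons_of_pos (by simpa using hP)]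
        exact app2_join_cons acc cur _ hP.1 (filter_mySplit_ne_nil t [] rest)
      · rw [show myLongWordStep t (acc, cur) ' ' = (acc, []) from by
          unfold myLongWordStep
          rw [if_neg (by simp), if_neg hP]]
        rw [ih acc [], List.filter_cons_of_neg (by simpa using hP)]
    · rw [show myLongWordStep t (acc, cur) c = (acc, cur ++ [c]) from by
          unfold myLongWordStep
          rw [if_pos hc]]
      rw [ih acc (cur ++ [c])]
      simp [mySplit, hc]

-- ===== VERDICT (by name: the statement is the Claim_ definition above) =====
theorem my_long_word_spec : Claim_equal_my_long_word := by
  intro t phrase _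
  unfold Spec_my_long_word my_long_word my_long_word_alt
  rw [splitOn_eq_mySplit, loop_eq t phrase.toList [] []]
  simp [app2]
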